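-- pv_equiv track=rewrite | github.com/ChrisCScott/forecaster | forecaster/utility.py | nearest_year
-- ===== SOURCE A (Python) =====
-- def nearest_year(vals, year):
--     """ Finds the nearest (past) year to `year` in `vals`.
--
--     This is a companion method to `inflation_adjust()`. It's meant to be
--     used when you want to pull a value out of an incomplete dict without
--     inflation-adjusting it (e.g. when you want to grab the most recent
--     percentage rate from a dict of `{year: Decimal}` pairs.)
--
--     If `year` is in `vals`, then this method returns `year`.
--     If not, then this method tries to find the last year
--     before `year` that is in `vals`. If that doesn't work, then this
--     method tries to find the first year in `vals` following `year`.
--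
--     Returns:
--         A year in `vals` is near to `year`, preferring
--         the nearest preceding year (if it exists) over the nearest
--         following year.
--
--         Returns `None` if `vals` is empty.
--     """
--     if vals == {}:
--         return None
--
--     # If the year is explicitly represented, no need to inflation-adjust
--     if year in vals:
--         return year
--
--     # Look for the most recent year prior to `year` that's in vals
--     key = max((k for k in vals if k < year), default=None)
--
--     # If that didn't work, look for the closest following year.
--     if key is None:
--         key = min((k for k in vals if k > year), default=None)
--
--     return key
-- ===== SOURCE B (Python) =====
-- def nearest_year(vals, year):
--     """Single-pass re-implementation: one loop tracking an exact-match flag,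
--     the best preceding key and the best following key."""
--     found = False
--     below = None
--     above = None
--     for k in vals:
--         if k == year:
--             found = True
--         elif k < year:
--             below = k if below is None else max(below, k)
--         else:
--             above = k if above is None else min(above, k)
--     if found:
--         return year
--     if below is not None:
--         return below
--     return above
-- ===== Notes on version B (the rewrite author's own statement) =====
-- stated objective: alternative
-- what changed: Replaced the membership test plus two separate comprehension-with-max/min scans by a single explicit loop over the keys that simultaneously tracks an exact-match flag, the running maximum key below year and the running minimum key above year.
import Mathlib
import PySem

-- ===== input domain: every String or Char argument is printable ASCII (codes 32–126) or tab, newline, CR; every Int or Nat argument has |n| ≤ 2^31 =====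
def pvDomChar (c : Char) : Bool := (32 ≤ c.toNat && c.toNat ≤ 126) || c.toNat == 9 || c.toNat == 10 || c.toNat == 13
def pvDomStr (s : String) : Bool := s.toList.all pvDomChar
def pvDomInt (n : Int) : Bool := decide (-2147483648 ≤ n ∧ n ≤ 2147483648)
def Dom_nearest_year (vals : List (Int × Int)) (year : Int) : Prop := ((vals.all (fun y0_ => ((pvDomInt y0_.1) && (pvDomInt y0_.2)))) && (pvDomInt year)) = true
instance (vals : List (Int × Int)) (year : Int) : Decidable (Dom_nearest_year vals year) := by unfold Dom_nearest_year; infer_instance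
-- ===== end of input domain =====

-- B replaces A's membership test and two comprehension max/min scans by one explicit loop
-- tracking an exact-match flag, the best preceding key and the best following key (objective: alternative).


-- ===== PORT A =====
def nearest_year (vals : List (Int × Int)) (year : Int) : Option Int :=
  if vals = [] then none
  else if vals.any (fun kv => kv.1 == year) then some year
  else
    -- key = max((k for k in vals if k < year), default=None)
    let key := PySem.List.max? (((vals.map Prod.fst)).filter (fun k => decide (k < year))) (fun x => x)
    match key with
    | some k => some k
    | none => PySem.List.min? (((vals.map Prod.fst)).filter (fun k => decide (year < k))) (fun x => x)

-- ===== PORT B =====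
-- one step of B's loop over the keys
def nyStep (year : Int) (st : Bool × Option Int × Option Int) (kv : Int × Int) :
    Bool × Option Int × Option Int :=
  let k := kv.1
  if k = year then (true, st.2.1, st.2.2)
  else if k < year then
    (st.1, some (match st.2.1 with | none => k | some b => max b k), st.2.2)
  else
    (st.1, st.2.1, some (match st.2.2 with | none => k | some a => min a k))

def nearest_year_alt (vals : List (Int × Int)) (year : Int) : Option Int :=
  let st := vals.foldl (nyStep year) (false, none, none)
  if st.1 then some year
  else match st.2.1 with
  | some b => some b
  | none => st.2.2

-- ===== PRECONDITION & SPEC =====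
def Spec_nearest_year (vals : List (Int × Int)) (year : Int) (out : Option Int) : Prop := out = nearest_year_alt vals year
instance (vals : List (Int × Int)) (year : Int) (out : Option Int) : Decidable (Spec_nearest_year vals year out) := by unfold Spec_nearest_year; infer_instance

-- ===== CLAIM (what is proved, stated in full; the proofs are below) =====
def Claim_equal_nearest_year : Prop := ∀ (vals : List (Int × Int)) (year : Int), Dom_nearest_year vals year → Spec_nearest_year vals year (nearest_year vals year)

-- ===== LEMMAS AND PROOFS =====

def ombMax (o : Option Int) (k : Int) : Option Int :=
  some (match o with | none => k | some b => max b k)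
def ombMin (o : Option Int) (k : Int) : Option Int :=
  some (match o with | none => k | some a => min a k)

theorem nyStep_fold (year : Int) (vals : List (Int × Int)) :
    ∀ (f : Bool) (b a : Option Int),
    vals.foldl (nyStep year) (f, b, a) =
      (f || vals.any (fun kv => kv.1 == year),
       ((vals.map Prod.fst).filter (fun k => decide (k < year))).foldl ombMax b,
       ((vals.map Prod.fst).filter (fun k => decide (year < k))).foldl ombMin a) := by
  induction vals with
  | nil => simp
  | cons kv t ih =>
    intro f b a
    by_cases h1 : kv.1 = year
    · simp [nyStep, h1, ih]
    · by_cases h2 : kv.1 < year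
      · have h3 : ¬ year < kv.1 := by omega
        have h4 : (kv.1 == year) = false := by simp [h1]
        simp [nyStep, h1, h2, h3, ih, ombMax, h4]
      · have h3 : year < kv.1 := by omega
        have h4 : (kv.1 == year) = false := by simp [h1]
        simp [nyStep, h1, h2, h3, ih, ombMin, h4]

theorem foldl_ombMax_some (t : List Int) : ∀ b : Int,
    t.foldl ombMax (some b) = some (t.foldl max b) := by
  induction t with
  | nil => intro b; rfl
  | cons x t ih => intro b; simp [ombMax, ih]

theorem foldl_ombMax_max? (l : List Int) :
    l.foldl ombMax none = PySem.List.max? l (fun x => x) := by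
  cases l with
  | nil => rfl
  | cons x t =>
    simp [List.foldl, ombMax, PySem.List.max?_id_cons, foldl_ombMax_some]

theorem foldl_ombMin_some (t : List Int) : ∀ a : Int,
    t.foldl ombMin (some a) = some (t.foldl min a) := by
  induction t with
  | nil => intro a; rfl
  | cons x t ih => intro a; simp [ombMin, ih]

theorem foldl_ombMin_min? (l : List Int) :
    l.foldl ombMin none = PySem.List.min? l (fun x => x) := by
  cases l with
  | nil => rfl
  | cons x t =>
    simp [List.foldl, ombMin, PySem.List.min?_id_cons, foldl_ombMin_some]

-- ===== VERDICT (by name: the statement is the Claim_ definition above) =====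
theorem nearest_year_spec : Claim_equal_nearest_year := by
  intro vals year _
  unfold Spec_nearest_year nearest_year nearest_year_alt
  rw [nyStep_fold]
  cases vals with
  | nil => simp
  | cons kv t =>
    by_cases hmem : (kv :: t).any (fun p => p.1 == year)
    · simp [hmem]
    · simp only [hmem, Bool.false_or,
        foldl_ombMax_max?, foldl_ombMin_min?]
      cases h : PySem.List.max? (((kv :: t).map Prod.fst).filter (fun k => decide (k < year))) (fun x => x) <;>
        simp
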